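-- pv_equiv track=rewrite | github.com/YvesDup/FormationPython | Kampus/Workshopdev/Devops/W3W4/exo35.py | creer_index
-- ===== SOURCE A (Python) =====
-- def creer_index(phrase: str, occurrence_mini: int=1) -> dict:
--     """
--     """
--     d = {}
--     for mot in phrase.split():
--         if mot in d:
--             d[mot] += 1
--         else:
--             d[mot] = 1
--
--     if occurrence_mini > 1:
--         return {k: v for k, v in d.items() if v >= occurrence_mini}
--
--     return d
-- ===== SOURCE B (Python) =====
-- def creer_index(phrase: str, occurrence_mini: int = 1) -> dict:
--     seuil = max(occurrence_mini, 1)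
--
--     def index(mots):
--         if not mots:
--             return {}
--         premier = mots[0]
--         reste = [m for m in mots[1:] if m != premier]
--         n = len(mots) - len(reste)
--         res = {premier: n} if n >= seuil else {}
--         res.update(index(reste))
--         return res
--
--     return index(phrase.split())
-- ===== Notes on version B (the rewrite author's own statement) =====
-- stated objective: alternative
-- what changed: Replaces the hash-counting loop plus separate filtering pass with a recursive partition scheme: take the first word, strip all its occurrences from the tail (counting them by the length drop), emit it if it meets the unified threshold max(occurrence_mini,1), and recurse on the stripped remainder.
import Mathlib
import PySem

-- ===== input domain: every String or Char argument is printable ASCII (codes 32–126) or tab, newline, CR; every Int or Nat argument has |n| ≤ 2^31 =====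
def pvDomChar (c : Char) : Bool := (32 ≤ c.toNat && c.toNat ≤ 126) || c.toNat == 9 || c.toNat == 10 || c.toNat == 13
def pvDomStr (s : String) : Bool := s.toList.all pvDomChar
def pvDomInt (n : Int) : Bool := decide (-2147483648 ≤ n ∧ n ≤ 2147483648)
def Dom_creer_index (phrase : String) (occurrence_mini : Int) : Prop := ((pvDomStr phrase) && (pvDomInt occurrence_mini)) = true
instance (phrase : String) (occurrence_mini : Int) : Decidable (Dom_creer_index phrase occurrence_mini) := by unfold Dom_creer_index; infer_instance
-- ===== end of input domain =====

-- B replaces A's hash-counting loop + filtering pass with a recursive partition scheme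
-- (strip the first word's occurrences from the tail, count them by the length drop,
-- recurse on the stripped remainder); objective: a genuinely different algorithm.

-- ===== PORT A =====
def creer_index (phrase : String) (occurrence_mini : Int) : List (String × Int) :=
  let d := (PySem.Str.split₀ phrase).foldl
    (fun d mot =>
      if d.contains mot then d.insert mot (d.getD mot 0 + 1)
      else d.insert mot 1)
    PySem.Dict.empty
  if occurrence_mini > 1 then
    (d.items.foldl
      (fun d2 kv => if kv.2 ≥ occurrence_mini then d2.insert kv.1 kv.2 else d2)
      PySem.Dict.empty).items
  else d.items

-- ===== PORT B =====
-- recursive helper 'index' from Source B; 'res.update' on fresh keys is list append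
def creer_index_alt_index (seuil : Int) : List String → List (String × Int)
  | [] => []
  | premier :: tail =>
    let reste := tail.filter (fun m => m ≠ premier)
    let n : Int := ((premier :: tail).length : Int) - (reste.length : Int)
    (if n ≥ seuil then [(premier, n)] else []) ++ creer_index_alt_index seuil reste
termination_by mots => mots.length
decreasing_by
  simp only [List.length_cons, List.length_unattach]
  exact Nat.lt_succ_of_le (le_trans (List.length_filter_le _ _) (by simp))

def creer_index_alt (phrase : String) (occurrence_mini : Int) : List (String × Int) :=
  creer_index_alt_index (max occurrence_mini 1) (PySem.Str.split₀ phrase)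

-- ===== PRECONDITION & SPEC =====
def Spec_creer_index (phrase : String) (occurrence_mini : Int) (out : List (String × Int)) : Prop := out = creer_index_alt phrase occurrence_mini
instance (phrase : String) (occurrence_mini : Int) (out : List (String × Int)) : Decidable (Spec_creer_index phrase occurrence_mini out) := by unfold Spec_creer_index; infer_instance

-- ===== CLAIM (what is proved, stated in full; the proofs are below) =====
def Claim_equal_creer_index : Prop := ∀ (phrase : String) (occurrence_mini : Int), Dom_creer_index phrase occurrence_mini → Spec_creer_index phrase occurrence_mini (creer_index phrase occurrence_mini)

-- ===== LEMMAS AND PROOFS =====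

-- A's counting loop is Counter(words)
theorem pv_count_loop_eq_counter (ws : List String) :
    ws.foldl
      (fun d mot =>
        if d.contains mot then d.insert mot (d.getD mot 0 + 1)
        else d.insert mot 1)
      PySem.Dict.empty
    = PySem.Dict.counter ws := by
  rw [← PySem.Dict.foldl_insert_getD_add_one_eq_counter]
  apply PySem.List.foldl_congr_mem
  intro d mot _
  by_cases h : d.contains mot = true
  · simp [h]
  · simp only [Bool.not_eq_true] at h
    rw [if_neg (by simp [h]), PySem.Dict.getD_of_not_contains d (0:Int) h]
    norm_num

-- an insert-if fold from empty over nodup fresh keys yields filter-then-map items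
theorem pv_filter_fold_items (l : List (String × Int)) (m : Int)
    (hnd : (l.map Prod.fst).Nodup) :
    (l.foldl
      (fun d2 kv => if kv.2 ≥ m then d2.insert kv.1 kv.2 else d2)
      (PySem.Dict.empty : PySem.Dict String Int)).items
    = l.filter (fun kv => decide (kv.2 ≥ m)) := by
  rw [PySem.List.foldl_ite_eq_foldl_filter]
  rw [PySem.Dict.items_foldl_insert_fresh (k := Prod.fst) (v := Prod.snd)]
  · simp [PySem.Dict.empty]
  · intro a _; simp [PySem.Dict.contains_empty]
  · exact hnd.sublist ((List.filter_sublist).map Prod.fst)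

-- the length drop of stripping x counts x
theorem pv_length_drop_count {α : Type} [DecidableEq α] (l : List α) (x : α) :
    l.length - (l.filter (fun m => m ≠ x)).length = l.count x := by
  induction l with
  | nil => simp
  | cons a t ih =>
    have hle : (t.filter (fun m => m ≠ x)).length ≤ t.length := t.length_filter_le _
    by_cases hax : a = x
    · subst hax
      simp only [List.filter_cons]
      rw [if_neg (by simp)]
      simp only [List.length_cons, List.count_cons_self]
      omega
    · simp only [List.filter_cons]
      rw [if_pos (by simp [hax])]
      simp only [List.length_cons, List.count_cons_of_ne hax]
      omega

-- folding Set.add over l ignores elements already present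
theorem pv_foldl_add_strip (x : String) (l : List String) :
    ∀ s : List String, x ∈ s →
      l.foldl PySem.Set.add s = (l.filter (fun m => m ≠ x)).foldl PySem.Set.add s := by
  induction l with
  | nil => intro s _; rfl
  | cons a t ih =>
    intro s hx
    by_cases hax : a = x
    · subst hax
      have hadd : PySem.Set.add s a = s := by
        simp [PySem.Set.add, PySem.Set.contains, hx]
      simp only [List.filter_cons]
      rw [if_neg (by simp)]
      simp only [List.foldl_cons, hadd]
      exact ih s hx
    · simp only [List.filter_cons]
      rw [if_pos (by simp [hax])]
      simp only [List.foldl_cons]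
      exact ih _ ((PySem.Set.mem_add s a x).2 (Or.inl hx))

-- folding Set.add with a fresh head in the accumulator commutes with cons
theorem pv_foldl_add_cons (x : String) (l : List String) :
    ∀ s : List String, x ∉ l →
      l.foldl PySem.Set.add (x :: s) = x :: l.foldl PySem.Set.add s := by
  induction l with
  | nil => intro s _; rfl
  | cons a t ih =>
    intro s hx
    have hax : a ≠ x := fun h => hx (by simp [h])
    have hstep : PySem.Set.add (x :: s) a = x :: PySem.Set.add s a := by
      simp only [PySem.Set.add, PySem.Set.contains, List.contains_cons]
      rw [show (a == x) = false from beq_eq_false_iff_ne.2 hax]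
      simp only [Bool.false_or]
      split <;> simp
    simp only [List.foldl_cons, hstep]
    exact ih _ (fun h => hx (by simp [h]))

-- dedup after stripping the head
theorem pv_dedup_cons_strip (x : String) (t : List String) :
    PySem.List.dedup (x :: t) = x :: PySem.List.dedup (t.filter (fun m => m ≠ x)) := by
  have h1 : PySem.List.dedup (x :: t) = t.foldl PySem.Set.add [x] := by
    simp [PySem.List.dedup_eq_ofList, PySem.Set.ofList_eq_foldl, PySem.Set.add,
      PySem.Set.contains]
  rw [h1, pv_foldl_add_strip x t [x] (by simp),
    pv_foldl_add_cons x _ [] (by simp)]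
  simp [PySem.List.dedup_eq_ofList, PySem.Set.ofList_eq_foldl]

-- inside dedup of the stripped tail, counts in the full list equal counts in the remainder
theorem pv_count_reste (premier w : String) (tail : List String)
    (hw : w ∈ PySem.List.dedup (tail.filter (fun m => m ≠ premier))) :
    (premier :: tail).count w = (tail.filter (fun m => m ≠ premier)).count w := by
  have hwr : w ∈ tail.filter (fun m => m ≠ premier) := (PySem.List.mem_dedup _ _).1 hw
  have hwp : w ≠ premier := by
    have := (List.mem_filter.1 hwr).2; simpa using this
  rw [List.count_cons_of_ne (fun h => hwp h.symm),
    List.count_filter (by simp [hwp])]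

-- B's recursion, bounded strong induction
theorem pv_index_eq_aux (seuil : Int) :
    ∀ (N : Nat) (ws : List String), ws.length ≤ N →
    creer_index_alt_index seuil ws
    = ((PySem.List.dedup ws).filter
        (fun w => decide ((ws.count w : Int) ≥ seuil))).map
        (fun w => (w, (ws.count w : Int))) := by
  intro N
  induction N with
  | zero =>
    intro ws h
    have : ws = [] := List.eq_nil_of_length_eq_zero (Nat.le_zero.1 h)
    subst this
    rw [creer_index_alt_index]
    simp [PySem.List.dedup_eq_ofList, PySem.Set.ofList_eq_foldl]
  | succ N ih =>
    intro ws h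
    match ws with
    | [] =>
      rw [creer_index_alt_index]
      simp [PySem.List.dedup_eq_ofList, PySem.Set.ofList_eq_foldl]
    | premier :: tail =>
      rw [creer_index_alt_index]
      have hle : (tail.filter (fun m => m ≠ premier)).length ≤ tail.length :=
        tail.length_filter_le _
      have hlen : (tail.filter (fun m => m ≠ premier)).length ≤ N := by
        simp only [List.length_cons] at h; omega
      have hdrop := pv_length_drop_count tail premier
      have hn : (((premier :: tail).length : Int)
            - ((tail.filter (fun m => m ≠ premier)).length : Int))
          = ((premier :: tail).count premier : Int) := by
        simp only [List.length_cons, List.count_cons_self]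
        omega
      rw [hn, ih _ hlen, pv_dedup_cons_strip, List.filter_cons]
      have htail :
          ((PySem.List.dedup (tail.filter (fun m => m ≠ premier))).filter
              (fun w => decide ((((premier :: tail).count w : Nat) : Int) ≥ seuil))).map
            (fun w => ((w, (((premier :: tail).count w : Nat) : Int)) : String × Int))
          = ((PySem.List.dedup (tail.filter (fun m => m ≠ premier))).filter
              (fun w => decide ((((tail.filter (fun m => m ≠ premier)).count w : Nat) : Int) ≥ seuil))).map
            (fun w => (w, (((tail.filter (fun m => m ≠ premier)).count w : Nat) : Int))) := by
        rw [List.filter_congr (fun w hw => by rw [pv_count_reste premier w tail hw])]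
        exact List.map_congr_left (fun w hw => by
          rw [pv_count_reste premier w tail (List.mem_of_mem_filter hw)])
      by_cases hs : (((premier :: tail).count premier : Nat) : Int) ≥ seuil
      · rw [if_pos hs, if_pos (by simpa using hs)]
        simp only [List.map_cons, List.singleton_append]
        rw [htail]
      · rw [if_neg hs, if_neg (by simpa using hs)]
        simp only [List.nil_append]
        rw [htail]

-- B's recursion yields filter-then-map over the dedup list
theorem pv_index_eq (seuil : Int) (ws : List String) :
    creer_index_alt_index seuil ws
    = ((PySem.List.dedup ws).filter
        (fun w => decide ((ws.count w : Int) ≥ seuil))).map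
        (fun w => (w, (ws.count w : Int))) :=
  pv_index_eq_aux seuil ws.length ws le_rfl

-- ===== VERDICT (by name: the statement is the Claim_ definition above) =====
theorem creer_index_spec : Claim_equal_creer_index := by
  intro phrase m _
  show creer_index phrase m = creer_index_alt phrase m
  unfold creer_index creer_index_alt
  simp only []
  set ws := PySem.Str.split₀ phrase with hws
  rw [pv_count_loop_eq_counter, pv_index_eq]
  by_cases hm : m > 1
  · simp only [if_pos hm]
    rw [pv_filter_fold_items]
    · rw [PySem.Dict.items_counter]
      rw [List.filter_map]
      have hseuil : max m 1 = m := by omega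
      rw [hseuil]
      simp [Function.comp_def]
    · rw [PySem.Dict.items_counter]
      simp only [List.map_map, Function.comp_def]
      simp only [List.map_id']
      exact PySem.Set.nodup_ofList ws
  · simp only [if_neg hm]
    rw [PySem.Dict.items_counter]
    have hseuil : max m 1 = 1 := by omega
    rw [hseuil]
    have : (PySem.List.dedup ws).filter (fun w => decide ((ws.count w : Int) ≥ 1))
        = PySem.List.dedup ws := by
      apply List.filter_eq_self.2
      intro x hx
      have : x ∈ ws := (PySem.List.mem_dedup ws x).1 hx
      have hc : 0 < ws.count x := List.count_pos_iff.2 this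
      simp
      omega
    rw [this]
    simp [PySem.List.dedup_eq_ofList]
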